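-- pv_equiv track=rewrite | github.com/NpKOI/MotoLogv2 | app.py | categorize_tags
-- ===== SOURCE A (Python) =====
-- TAG_CATEGORIES = {
--     'weather': {'sunny', 'rain', 'cloudy', 'cold'},
--     'terrain': {'gravel', 'offroad', 'highway', 'city'},
--     'style':   {'commute', 'tour', 'sport', 'leisure'}
-- }
--
-- def categorize_tags(tags_str):
--     """
--     Accepts a comma-separated tag string and returns:
--       - groups: dict with keys 'weather','terrain','style','other' -> lists of tags sorted alphabetically
--       - flat: flattened list in the order weather, terrain, style, other
--     """
--     tags = [t.strip() for t in (tags_str or '').split(',') if t.strip()]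
--     groups = {'weather': [], 'terrain': [], 'style': [], 'other': []}
--
--     for t in tags:
--         low = t.lower()
--         placed = False
--         for cat, setvals in TAG_CATEGORIES.items():
--             if low in setvals:
--                 groups[cat].append(t)
--                 placed = True
--                 break
--         if not placed:
--             groups['other'].append(t)
--
--     # Sort each group's tags alphabetically (case-insensitive)
--     for k in groups:
--         groups[k] = sorted(groups[k], key=lambda s: s.lower())
--
--     # Flatten in the desired display order
--     flat = groups['weather'] + groups['terrain'] + groups['style'] + groups['other']
--     return groups, flat
-- ===== SOURCE B (Python) =====
-- TAG_CATEGORIES = {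
--     'weather': {'sunny', 'rain', 'cloudy', 'cold'},
--     'terrain': {'gravel', 'offroad', 'highway', 'city'},
--     'style':   {'commute', 'tour', 'sport', 'leisure'}
-- }
--
-- _REVMAP = {t: cat for cat, vals in TAG_CATEGORIES.items() for t in vals}
--
--
-- def categorize_tags(tags_str):
--     tags = [t.strip() for t in (tags_str or '').split(',') if t.strip()]
--     # one case-insensitive sort up front; stable appends keep every bucket sorted
--     tags.sort(key=lambda s: s.lower())
--     groups = {'weather': [], 'terrain': [], 'style': [], 'other': []}
--     for t in tags:
--         groups[_REVMAP.get(t.lower(), 'other')].append(t)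
--     flat = groups['weather'] + groups['terrain'] + groups['style'] + groups['other']
--     return groups, flat
-- ===== Notes on version B (the rewrite author's own statement) =====
-- stated objective: idiomatic
-- what changed: B precomputes a reverse tag->category dict once and replaces A's per-tag scan over TAG_CATEGORIES plus four per-group sorts with a single case-insensitive sort of the whole tag list followed by one stable distribution pass into the buckets.
import Mathlib
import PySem

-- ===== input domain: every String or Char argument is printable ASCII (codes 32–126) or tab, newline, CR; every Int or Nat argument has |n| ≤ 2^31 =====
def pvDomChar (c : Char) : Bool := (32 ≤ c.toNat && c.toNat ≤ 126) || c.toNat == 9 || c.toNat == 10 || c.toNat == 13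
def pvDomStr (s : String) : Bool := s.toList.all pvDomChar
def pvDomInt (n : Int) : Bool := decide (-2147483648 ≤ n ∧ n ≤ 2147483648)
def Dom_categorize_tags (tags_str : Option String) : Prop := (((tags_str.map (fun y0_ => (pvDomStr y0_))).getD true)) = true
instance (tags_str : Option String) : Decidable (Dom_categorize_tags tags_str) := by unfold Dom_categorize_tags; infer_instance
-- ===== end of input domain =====

-- B restructures A: one case-insensitive sort of the whole tag list up front plus a single
-- distribution pass via a reverse tag→category map, instead of A's per-tag category scan and
-- four per-group sorts (objective: idiomatic / alternative, same observable result).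

-- ===== PORT A =====
-- (in both ports: `split? s ","` with the nonempty literal separator is always `some`, so `.getD []` is a totality unwrap only)
def tagCategories : List (String × PySem.Set String) :=
  [("weather", ["sunny", "rain", "cloudy", "cold"]),
   ("terrain", ["gravel", "offroad", "highway", "city"]),
   ("style",   ["commute", "tour", "sport", "leisure"])]

-- inner 'for cat, setvals in TAG_CATEGORIES.items(): … break' loop
def findCat : List (String × PySem.Set String) → String → Option String
  | [], _ => none
  | (cat, sv) :: rest, low =>
      if PySem.Set.contains sv low then some cat else findCat rest low

def categorize_tags (tags_str : Option String) : (List (String × List String)) × List String :=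
  let tags := (((PySem.Str.split? (tags_str.getD "") ",").getD []).filter
                (fun t => !(PySem.Str.strip t == ""))).map PySem.Str.strip
  let groups0 : PySem.Dict String (List String) :=
    PySem.Dict.mk [("weather", []), ("terrain", []), ("style", []), ("other", [])]
  let groups1 := tags.foldl (fun g t =>
    let low := PySem.Str.lower t
    match findCat tagCategories low with
    | some cat => g.modify cat [] (· ++ [t])
    | none     => g.modify "other" [] (· ++ [t])) groups0
  -- 'for k in groups: groups[k] = sorted(groups[k], key=lambda s: s.lower())' (keys all present)
  let groups2 := groups1.keys.foldl
    (fun g k => g.insert k (PySem.List.sorted (g.getD k []) (fun s => PySem.Str.lower s) false)) groups1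
  let flat := groups2.getD "weather" [] ++ groups2.getD "terrain" [] ++
              groups2.getD "style" [] ++ groups2.getD "other" []
  (groups2.items, flat)

-- ===== PORT B =====
-- _REVMAP = {t: cat for cat, vals in TAG_CATEGORIES.items() for t in vals}
def revMap : PySem.Dict String String :=
  tagCategories.foldl (fun d p => p.2.foldl (fun d t => d.insert t p.1) d) PySem.Dict.empty

def categorize_tags_alt (tags_str : Option String) : (List (String × List String)) × List String :=
  let tags := (((PySem.Str.split? (tags_str.getD "") ",").getD []).filter
                (fun t => !(PySem.Str.strip t == ""))).map PySem.Str.strip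
  let tags := PySem.List.sorted tags (fun s => PySem.Str.lower s) false
  let groups0 : PySem.Dict String (List String) :=
    PySem.Dict.mk [("weather", []), ("terrain", []), ("style", []), ("other", [])]
  let groups := tags.foldl (fun g t =>
    g.modify (revMap.getD (PySem.Str.lower t) "other") [] (· ++ [t])) groups0
  let flat := groups.getD "weather" [] ++ groups.getD "terrain" [] ++
              groups.getD "style" [] ++ groups.getD "other" []
  (groups.items, flat)

-- ===== PRECONDITION & SPEC =====
def Spec_categorize_tags (tags_str : Option String) (out : (List (String × List String)) × List String) : Prop := out = categorize_tags_alt tags_str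
instance (tags_str : Option String) (out : (List (String × List String)) × List String) : Decidable (Spec_categorize_tags tags_str out) := by unfold Spec_categorize_tags; infer_instance

-- ===== CLAIM (what is proved, stated in full; the proofs are below) =====
def Claim_equal_categorize_tags : Prop := ∀ (tags_str : Option String), Dom_categorize_tags tags_str → Spec_categorize_tags tags_str (categorize_tags tags_str)

-- ===== LEMMAS AND PROOFS =====

-- A's per-tag category, as a function: the first matching category, else "other".
def keyA (t : String) : String :=
  (findCat tagCategories (PySem.Str.lower t)).getD "other"

theorem findCat_mem (cats : List (String × PySem.Set String)) (low c : String)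
    (h : findCat cats low = some c) : c ∈ cats.map (·.1) := by
  induction cats with
  | nil => simp [findCat] at h
  | cons p rest ih =>
    rcases p with ⟨cat, sv⟩
    by_cases hc : low ∈ sv
    · simp [findCat, PySem.Set.contains, List.contains_eq_mem, hc] at h
      simp [h]
    · simp only [findCat, PySem.Set.contains, List.contains_eq_mem, hc, decide_false,
        Bool.false_eq_true, if_false] at h
      simp [ih h]

theorem keyA_range (t : String) :
    keyA t = "weather" ∨ keyA t = "terrain" ∨ keyA t = "style" ∨ keyA t = "other" := by
  unfold keyA
  rcases h : findCat tagCategories (PySem.Str.lower t) with _ | c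
  · simp
  · have := findCat_mem _ _ _ h
    simp only [tagCategories, List.map, List.mem_cons, List.not_mem_nil, or_false] at this
    tauto

-- A's per-tag category (scan + placed flag) agrees with B's reverse-map lookup, pointwise.
theorem catA_eq_catB (s : String) :
    (findCat tagCategories s).getD "other" = PySem.Dict.getD revMap s "other" := by
  have h : revMap = PySem.Dict.mk
      [("sunny", "weather"), ("rain", "weather"), ("cloudy", "weather"), ("cold", "weather"),
       ("gravel", "terrain"), ("offroad", "terrain"), ("highway", "terrain"), ("city", "terrain"),
       ("commute", "style"), ("tour", "style"), ("sport", "style"), ("leisure", "style")] := by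
    decide
  rw [h]
  rcases eq_or_ne ("sunny" : String) s with h1 | h1; · subst h1; decide
  rcases eq_or_ne ("rain" : String) s with h2 | h2; · subst h2; decide
  rcases eq_or_ne ("cloudy" : String) s with h3 | h3; · subst h3; decide
  rcases eq_or_ne ("cold" : String) s with h4 | h4; · subst h4; decide
  rcases eq_or_ne ("gravel" : String) s with h5 | h5; · subst h5; decide
  rcases eq_or_ne ("offroad" : String) s with h6 | h6; · subst h6; decide
  rcases eq_or_ne ("highway" : String) s with h7 | h7; · subst h7; decide
  rcases eq_or_ne ("city" : String) s with h8 | h8; · subst h8; decide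
  rcases eq_or_ne ("commute" : String) s with h9 | h9; · subst h9; decide
  rcases eq_or_ne ("tour" : String) s with h10 | h10; · subst h10; decide
  rcases eq_or_ne ("sport" : String) s with h11 | h11; · subst h11; decide
  rcases eq_or_ne ("leisure" : String) s with h12 | h12; · subst h12; decide
  have e1 : ("sunny" == s) = false := beq_eq_false_iff_ne.mpr h1
  have e2 : ("rain" == s) = false := beq_eq_false_iff_ne.mpr h2
  have e3 : ("cloudy" == s) = false := beq_eq_false_iff_ne.mpr h3
  have e4 : ("cold" == s) = false := beq_eq_false_iff_ne.mpr h4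
  have e5 : ("gravel" == s) = false := beq_eq_false_iff_ne.mpr h5
  have e6 : ("offroad" == s) = false := beq_eq_false_iff_ne.mpr h6
  have e7 : ("highway" == s) = false := beq_eq_false_iff_ne.mpr h7
  have e8 : ("city" == s) = false := beq_eq_false_iff_ne.mpr h8
  have e9 : ("commute" == s) = false := beq_eq_false_iff_ne.mpr h9
  have e10 : ("tour" == s) = false := beq_eq_false_iff_ne.mpr h10
  have e11 : ("sport" == s) = false := beq_eq_false_iff_ne.mpr h11
  have e12 : ("leisure" == s) = false := beq_eq_false_iff_ne.mpr h12
  simp [findCat, tagCategories, PySem.Set.contains, List.contains_eq_mem,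
    PySem.Dict.getD, PySem.Dict.get?, List.find?,
    e1, e2, e3, e4, e5, e6, e7, e8, e9, e10, e11, e12,
    Ne.symm h1, Ne.symm h2, Ne.symm h3, Ne.symm h4, Ne.symm h5, Ne.symm h6,
    Ne.symm h7, Ne.symm h8, Ne.symm h9, Ne.symm h10, Ne.symm h11, Ne.symm h12]

-- insert at the front when x goes before everything
theorem insertBy_all_before {α : Type} (b : α → α → Bool) (x : α) (ys : List α)
    (h : ∀ y ∈ ys, b x y = true) : PySem.List.insertBy b x ys = x :: ys := by
  cases ys with
  | nil => rfl
  | cons y ys => simp [PySem.List.insertBy, h y (by simp)]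

theorem filter_insertBy_pos {α κ : Type} [LinearOrder κ] (key : α → κ) (p : α → Bool)
    (x : α) (ys : List α) (hp : p x = true)
    (hs : ys.Pairwise (fun a b => key a ≤ key b)) :
    (PySem.List.insertBy (fun a b => decide (key a < key b)) x ys).filter p
      = PySem.List.insertBy (fun a b => decide (key a < key b)) x (ys.filter p) := by
  induction ys with
  | nil => simp [PySem.List.insertBy, hp]
  | cons y ys ih =>
    rcases List.pairwise_cons.mp hs with ⟨hy, hs'⟩
    by_cases hlt : key x < key y
    · have hins : PySem.List.insertBy (fun a b => decide (key a < key b)) x (y :: ys)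
          = x :: y :: ys := by simp [PySem.List.insertBy, hlt]
      rw [hins]
      by_cases hpy : p y = true
      · rw [List.filter_cons_of_pos hp, List.filter_cons_of_pos hpy]
        simp [PySem.List.insertBy, hlt]
      · have hpy' : p y = false := by simpa using hpy
        rw [List.filter_cons_of_pos hp, List.filter_cons_of_neg (by simp [hpy'])]
        refine (insertBy_all_before _ _ _ (fun z hz => ?_)).symm
        have := hy z (List.mem_of_mem_filter hz)
        simp [lt_of_lt_of_le hlt this]
    · have hins : PySem.List.insertBy (fun a b => decide (key a < key b)) x (y :: ys)
          = y :: PySem.List.insertBy (fun a b => decide (key a < key b)) x ys := by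
        simp [PySem.List.insertBy, hlt]
      rw [hins]
      by_cases hpy : p y = true
      · rw [List.filter_cons_of_pos hpy, List.filter_cons_of_pos hpy, ih hs']
        have : PySem.List.insertBy (fun a b => decide (key a < key b)) x
            (y :: ys.filter p) = y :: PySem.List.insertBy (fun a b => decide (key a < key b)) x
            (ys.filter p) := by simp [PySem.List.insertBy, hlt]
        rw [this]
      · rw [List.filter_cons_of_neg (by simp_all), List.filter_cons_of_neg (by simp_all), ih hs']

theorem filter_insertBy_neg {α : Type} (b : α → α → Bool) (p : α → Bool)
    (x : α) (ys : List α) (hp : p x = false) :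
    (PySem.List.insertBy b x ys).filter p = ys.filter p := by
  induction ys with
  | nil => simp [PySem.List.insertBy, hp]
  | cons y ys ih =>
    by_cases hb : b x y = true
    · simp [PySem.List.insertBy, hb, List.filter_cons, hp]
    · simp only [PySem.List.insertBy, hb, Bool.false_eq_true, if_false]
      by_cases hpy : p y = true <;> simp [hpy, ih]

theorem sorted_append_singleton {α κ : Type} [LT κ] [DecidableLT κ]
    (xs : List α) (x : α) (key : α → κ) :
    PySem.List.sorted (xs ++ [x]) key
      = PySem.List.insertBy (fun a b => decide (key a < key b)) x (PySem.List.sorted xs key) := by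
  rw [PySem.List.sorted_eq_foldl_insertBy, PySem.List.sorted_eq_foldl_insertBy, List.foldl_append]
  rfl

-- filtering commutes with the stable sort
theorem filter_sorted {α κ : Type} [LinearOrder κ] (key : α → κ) (p : α → Bool) (xs : List α) :
    (PySem.List.sorted xs key).filter p = PySem.List.sorted (xs.filter p) key := by
  induction xs using List.reverseRecOn with
  | nil => rfl
  | append_singleton xs x ih =>
    rw [sorted_append_singleton, List.filter_append]
    by_cases hp : p x = true
    · rw [filter_insertBy_pos key p x _ hp (PySem.List.sorted_pairwise xs key), ih,
        show List.filter p [x] = [x] from by simp [hp], ← sorted_append_singleton]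
    · rw [filter_insertBy_neg _ p x _ (by simp_all), ih,
        show List.filter p [x] = [] from by simp [hp], List.append_nil]

-- the grouping loop over a dict with exactly the four fixed keys
theorem modify_lit_w (w t s o v : List String) :
    PySem.Dict.modify (PySem.Dict.mk [("weather", w), ("terrain", t), ("style", s), ("other", o)])
      "weather" [] (· ++ v)
    = PySem.Dict.mk [("weather", w ++ v), ("terrain", t), ("style", s), ("other", o)] := by
  simp [PySem.Dict.modify, PySem.Dict.insert, PySem.Dict.getD, PySem.Dict.get?, PySem.Dict.contains]

theorem modify_lit_t (w t s o v : List String) :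
    PySem.Dict.modify (PySem.Dict.mk [("weather", w), ("terrain", t), ("style", s), ("other", o)])
      "terrain" [] (· ++ v)
    = PySem.Dict.mk [("weather", w), ("terrain", t ++ v), ("style", s), ("other", o)] := by
  simp [PySem.Dict.modify, PySem.Dict.insert, PySem.Dict.getD, PySem.Dict.get?, PySem.Dict.contains]

theorem modify_lit_s (w t s o v : List String) :
    PySem.Dict.modify (PySem.Dict.mk [("weather", w), ("terrain", t), ("style", s), ("other", o)])
      "style" [] (· ++ v)
    = PySem.Dict.mk [("weather", w), ("terrain", t), ("style", s ++ v), ("other", o)] := by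
  simp [PySem.Dict.modify, PySem.Dict.insert, PySem.Dict.getD, PySem.Dict.get?, PySem.Dict.contains]

theorem modify_lit_o (w t s o v : List String) :
    PySem.Dict.modify (PySem.Dict.mk [("weather", w), ("terrain", t), ("style", s), ("other", o)])
      "other" [] (· ++ v)
    = PySem.Dict.mk [("weather", w), ("terrain", t), ("style", s), ("other", o ++ v)] := by
  simp [PySem.Dict.modify, PySem.Dict.insert, PySem.Dict.getD, PySem.Dict.get?, PySem.Dict.contains]

theorem foldl_modify_four (key : String → String) (l : List String) :
    ∀ (w t s o : List String),
    (∀ x ∈ l, key x = "weather" ∨ key x = "terrain" ∨ key x = "style" ∨ key x = "other") →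
    l.foldl (fun g x => PySem.Dict.modify g (key x) [] (· ++ [x]))
      (PySem.Dict.mk [("weather", w), ("terrain", t), ("style", s), ("other", o)])
    = PySem.Dict.mk
        [("weather", w ++ l.filter (fun x => key x == "weather")),
         ("terrain", t ++ l.filter (fun x => key x == "terrain")),
         ("style",  s ++ l.filter (fun x => key x == "style")),
         ("other",  o ++ l.filter (fun x => key x == "other"))] := by
  induction l with
  | nil => simp
  | cons x l ih =>
    intro w t s o hk
    have hx := hk x (by simp)
    have hrest : ∀ y ∈ l, key y = "weather" ∨ key y = "terrain" ∨ key y = "style" ∨ key y = "other" :=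
      fun y hy => hk y (by simp [hy])
    rcases hx with hx | hx | hx | hx
    · simp only [List.foldl_cons, hx, modify_lit_w, ih _ _ _ _ hrest]
      simp [hx]
    · simp only [List.foldl_cons, hx, modify_lit_t, ih _ _ _ _ hrest]
      simp [hx]
    · simp only [List.foldl_cons, hx, modify_lit_s, ih _ _ _ _ hrest]
      simp [hx]
    · simp only [List.foldl_cons, hx, modify_lit_o, ih _ _ _ _ hrest]
      simp [hx]

theorem getD_lit (w t s o : List String) :
    PySem.Dict.getD (PySem.Dict.mk [("weather", w), ("terrain", t), ("style", s), ("other", o)]) "weather" [] = w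
    ∧ PySem.Dict.getD (PySem.Dict.mk [("weather", w), ("terrain", t), ("style", s), ("other", o)]) "terrain" [] = t
    ∧ PySem.Dict.getD (PySem.Dict.mk [("weather", w), ("terrain", t), ("style", s), ("other", o)]) "style" [] = s
    ∧ PySem.Dict.getD (PySem.Dict.mk [("weather", w), ("terrain", t), ("style", s), ("other", o)]) "other" [] = o := by
  refine ⟨?_, ?_, ?_, ?_⟩ <;> simp [PySem.Dict.getD, PySem.Dict.get?, List.find?]

theorem insert_lit_w (w t s o v : List String) :
    PySem.Dict.insert (PySem.Dict.mk [("weather", w), ("terrain", t), ("style", s), ("other", o)]) "weather" v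
    = PySem.Dict.mk [("weather", v), ("terrain", t), ("style", s), ("other", o)] := by
  simp [PySem.Dict.insert, PySem.Dict.contains]

theorem insert_lit_t (w t s o v : List String) :
    PySem.Dict.insert (PySem.Dict.mk [("weather", w), ("terrain", t), ("style", s), ("other", o)]) "terrain" v
    = PySem.Dict.mk [("weather", w), ("terrain", v), ("style", s), ("other", o)] := by
  simp [PySem.Dict.insert, PySem.Dict.contains]

theorem insert_lit_s (w t s o v : List String) :
    PySem.Dict.insert (PySem.Dict.mk [("weather", w), ("terrain", t), ("style", s), ("other", o)]) "style" v
    = PySem.Dict.mk [("weather", w), ("terrain", t), ("style", v), ("other", o)] := by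
  simp [PySem.Dict.insert, PySem.Dict.contains]

theorem insert_lit_o (w t s o v : List String) :
    PySem.Dict.insert (PySem.Dict.mk [("weather", w), ("terrain", t), ("style", s), ("other", o)]) "other" v
    = PySem.Dict.mk [("weather", w), ("terrain", t), ("style", s), ("other", v)] := by
  simp [PySem.Dict.insert, PySem.Dict.contains]

-- the two bodies agree on any cleaned tag list
theorem core_eq (tags : List String) :
    (let groups1 := tags.foldl (fun g t =>
        match findCat tagCategories (PySem.Str.lower t) with
        | some cat => PySem.Dict.modify g cat [] (· ++ [t])
        | none     => PySem.Dict.modify g "other" [] (· ++ [t]))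
        (PySem.Dict.mk [("weather", []), ("terrain", []), ("style", []), ("other", [])]);
     let groups2 := groups1.keys.foldl
        (fun g k => PySem.Dict.insert g k
          (PySem.List.sorted (PySem.Dict.getD g k []) (fun s => PySem.Str.lower s) false)) groups1;
     (groups2.items,
      PySem.Dict.getD groups2 "weather" [] ++ PySem.Dict.getD groups2 "terrain" [] ++
      PySem.Dict.getD groups2 "style" [] ++ PySem.Dict.getD groups2 "other" []))
    = (let tags2 := PySem.List.sorted tags (fun s => PySem.Str.lower s) false;
       let groups := tags2.foldl (fun g t =>
          PySem.Dict.modify g (PySem.Dict.getD revMap (PySem.Str.lower t) "other") [] (· ++ [t]))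
          (PySem.Dict.mk [("weather", []), ("terrain", []), ("style", []), ("other", [])]);
       (groups.items,
        PySem.Dict.getD groups "weather" [] ++ PySem.Dict.getD groups "terrain" [] ++
        PySem.Dict.getD groups "style" [] ++ PySem.Dict.getD groups "other" [])) := by
  have hstep : (fun (g : PySem.Dict String (List String)) (t : String) =>
      match findCat tagCategories (PySem.Str.lower t) with
      | some cat => PySem.Dict.modify g cat [] (· ++ [t])
      | none     => PySem.Dict.modify g "other" [] (· ++ [t]))
      = (fun g t => PySem.Dict.modify g (keyA t) [] (· ++ [t])) := by
    funext g t
    unfold keyA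
    cases h : findCat tagCategories (PySem.Str.lower t) with
    | none => simp
    | some c => simp
  have hstepB : (fun (g : PySem.Dict String (List String)) (t : String) =>
      PySem.Dict.modify g (PySem.Dict.getD revMap (PySem.Str.lower t) "other") [] (· ++ [t]))
      = (fun g t => PySem.Dict.modify g (keyA t) [] (· ++ [t])) := by
    funext g t
    rw [keyA, catA_eq_catB]
  simp only [hstep, hstepB]
  rw [foldl_modify_four keyA tags [] [] [] [] (fun x _ => keyA_range x),
      foldl_modify_four keyA (PySem.List.sorted tags (fun s => PySem.Str.lower s) false)
        [] [] [] [] (fun x _ => keyA_range x)]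
  simp only [PySem.Dict.keys, List.map, List.nil_append, List.foldl_cons, List.foldl_nil,
    (getD_lit _ _ _ _).1, (getD_lit _ _ _ _).2.1, (getD_lit _ _ _ _).2.2.1, (getD_lit _ _ _ _).2.2.2,
    insert_lit_w, insert_lit_t, insert_lit_s, insert_lit_o]
  rw [filter_sorted, filter_sorted, filter_sorted, filter_sorted]

-- ===== VERDICT (by name: the statement is the Claim_ definition above) =====
theorem categorize_tags_spec : Claim_equal_categorize_tags := by
  intro ts _
  show categorize_tags ts = categorize_tags_alt ts
  exact core_eq ((((PySem.Str.split? (ts.getD "") ",").getD []).filter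
      (fun t => !(PySem.Str.strip t == ""))).map PySem.Str.strip)
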